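-- pv_equiv track=rewrite | github.com/pypi-data/pypi-mirror-397 | packages/mcp-mysql-ops/mcp_mysql_ops-1.3.2.tar.gz/mcp_mysql_ops-1.3.2/src/mcp_mysql_ops/functions.py | parse_prompt_sections
-- ===== SOURCE A (Python) =====
-- def parse_prompt_sections(template: str):
--     """
--     Parses the prompt template into section headings and sections.
--     Returns (headings, sections).
--     """
--     lines = template.splitlines()
--     sections = []
--     current = []
--     headings = []
--     for line in lines:
--         if line.startswith("## "):
--             if current:
--                 sections.append("\n".join(current))
--                 current = []
--             headings.append(line[3:].strip())  # Remove "## "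
--         current.append(line)
--     if current:
--         sections.append("\n".join(current))
--     return headings, sections
-- ===== SOURCE B (Python) =====
-- def parse_prompt_sections(template: str):
--     """
--     Single backwards pass: walking the lines in reverse, every "## " line can
--     seal its own section immediately (the pending tail lines belong to it),
--     so no flush bookkeeping is needed; reverse the accumulators at the end.
--     """
--     lines = template.splitlines()
--     headings = []
--     sections = []
--     pending = []
--     for line in reversed(lines):
--         if line.startswith("## "):
--             headings.append(line[3:].strip())
--             sections.append("\n".join([line] + pending[::-1]))
--             pending = []
--         else:
--             pending.append(line)
--     headings.reverse()
--     sections.reverse()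
--     if pending:
--         sections.insert(0, "\n".join(pending[::-1]))
--     return headings, sections
-- ===== Notes on version B (the rewrite author's own statement) =====
-- stated objective: alternative
-- what changed: Replaces A's forward loop with flush-on-next-heading bookkeeping and a trailing flush by a single backwards pass that seals each section immediately at its '## ' line, reversing the accumulators once at the end.
import Mathlib
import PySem

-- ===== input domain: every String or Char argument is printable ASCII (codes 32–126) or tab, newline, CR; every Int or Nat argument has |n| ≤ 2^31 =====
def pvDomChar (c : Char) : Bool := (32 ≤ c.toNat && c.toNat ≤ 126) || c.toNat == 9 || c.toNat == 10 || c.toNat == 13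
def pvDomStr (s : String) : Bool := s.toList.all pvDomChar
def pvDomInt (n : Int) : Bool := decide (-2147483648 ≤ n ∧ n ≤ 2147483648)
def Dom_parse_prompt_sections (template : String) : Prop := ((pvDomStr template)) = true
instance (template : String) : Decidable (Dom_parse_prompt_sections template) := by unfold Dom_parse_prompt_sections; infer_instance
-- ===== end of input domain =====

-- B replaces A's forward loop with flush bookkeeping by a single backwards pass
-- that seals each section at its "## " line (same cost; objective: alternative).

-- ===== PORT A =====
-- forward loop, state (sections, current, headings), final flush
def parse_prompt_sections (template : String) : List String × List String :=
  let lines := PySem.Str.splitlines template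
  let st := lines.foldl (fun (st : List String × List String × List String) line =>
    let (sections, current, headings) := st
    if PySem.Str.startswith line "## " then
      let (sections, current) :=
        if current ≠ [] then (sections ++ [PySem.Str.join "\n" current], ([] : List String))
        else (sections, current)
      (sections, current ++ [line],
       headings ++ [PySem.Str.strip (PySem.Str.slice line (some 3) none)])
    else
      (sections, current ++ [line], headings)) ([], [], [])
  let (sections, current, headings) := st
  let sections := if current ≠ [] then sections ++ [PySem.Str.join "\n" current] else sections
  (headings, sections)

-- ===== PORT B =====
-- backwards loop over reversed lines, state (headings, sections, pending), reversed at the end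
def parse_prompt_sections_alt (template : String) : List String × List String :=
  let lines := PySem.Str.splitlines template
  let st := lines.reverse.foldl (fun (st : List String × List String × List String) line =>
    let (headings, sections, pending) := st
    if PySem.Str.startswith line "## " then
      (headings ++ [PySem.Str.strip (PySem.Str.slice line (some 3) none)],
       sections ++ [PySem.Str.join "\n" (line :: pending.reverse)],
       ([] : List String))
    else
      (headings, sections, pending ++ [line])) ([], [], [])
  let (headings, sections, pending) := st
  let headings := headings.reverse
  let sections := sections.reverse
  let sections := if pending ≠ [] then PySem.Str.join "\n" pending.reverse :: sections else sections
  (headings, sections)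

-- ===== PRECONDITION & SPEC =====
def Spec_parse_prompt_sections (template : String) (out : List String × List String) : Prop := out = parse_prompt_sections_alt template
instance (template : String) (out : List String × List String) : Decidable (Spec_parse_prompt_sections template out) := by unfold Spec_parse_prompt_sections; infer_instance

-- ===== CLAIM (what is proved, stated in full; the proofs are below) =====
def Claim_equal_parse_prompt_sections : Prop := ∀ (template : String), Dom_parse_prompt_sections template → Spec_parse_prompt_sections template (parse_prompt_sections template)

-- ===== LEMMAS AND PROOFS =====

-- common recursive description of a line list: (headings, section groups without the
-- leading pre-heading group, pending lines before the first heading)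
def pvGo : List String → List String × List (List String) × List String
  | [] => ([], [], [])
  | l :: ls =>
    let (hs, gs, p) := pvGo ls
    if PySem.Str.startswith l "## " then
      (PySem.Str.strip (PySem.Str.slice l (some 3) none) :: hs, (l :: p) :: gs, [])
    else
      (hs, gs, l :: p)

def pvAStep (st : List String × List String × List String) (line : String) :
    List String × List String × List String :=
  let (sections, current, headings) := st
  if PySem.Str.startswith line "## " then
    let (sections, current) :=
      if current ≠ [] then (sections ++ [PySem.Str.join "\n" current], ([] : List String))
      else (sections, current)
    (sections, current ++ [line],
     headings ++ [PySem.Str.strip (PySem.Str.slice line (some 3) none)])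
  else
    (sections, current ++ [line], headings)

def pvBStep (st : List String × List String × List String) (line : String) :
    List String × List String × List String :=
  let (headings, sections, pending) := st
  if PySem.Str.startswith line "## " then
    (headings ++ [PySem.Str.strip (PySem.Str.slice line (some 3) none)],
     sections ++ [PySem.Str.join "\n" (line :: pending.reverse)],
     ([] : List String))
  else
    (headings, sections, pending ++ [line])

def pvFinishA (st : List String × List String × List String) : List String × List String :=
  (st.2.2, if st.2.1 = [] then st.1 else st.1 ++ [PySem.Str.join "\n" st.2.1])

theorem pvB_fold (ls : List String) :
    ls.reverse.foldl pvBStep ([], [], []) =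
      ((pvGo ls).1.reverse,
       ((pvGo ls).2.1.map (fun g => PySem.Str.join "\n" g)).reverse,
       (pvGo ls).2.2.reverse) := by
  induction ls with
  | nil => simp [pvGo]
  | cons l ls ih =>
    simp only [List.reverse_cons, List.foldl_append, List.foldl_cons, List.foldl_nil, ih]
    by_cases h : PySem.Chars.startswith l.toList ['#', '#', ' '] = true <;>
      simp [pvBStep, pvGo, h]

theorem pvA_fold (ls secs cur hds : List String) :
    pvFinishA (ls.foldl pvAStep (secs, cur, hds)) =
      (hds ++ (pvGo ls).1,
       secs ++ (if cur ++ (pvGo ls).2.2 = [] then []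
                else [PySem.Str.join "\n" (cur ++ (pvGo ls).2.2)])
            ++ (pvGo ls).2.1.map (fun g => PySem.Str.join "\n" g)) := by
  induction ls generalizing secs cur hds with
  | nil =>
    by_cases h : cur = [] <;> simp [pvFinishA, pvGo, h]
  | cons l ls ih =>
    rw [List.foldl_cons]
    by_cases h : PySem.Chars.startswith l.toList ['#', '#', ' '] = true
    · by_cases hc : cur = []
      · have hstep : pvAStep (secs, cur, hds) l =
            (secs, [l], hds ++ [PySem.Str.strip (PySem.Str.slice l (some 3) none)]) := by
          simp [pvAStep, h, hc]
        rw [hstep, ih]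
        simp [pvGo, h, hc]
      · have hstep : pvAStep (secs, cur, hds) l =
            (secs ++ [PySem.Str.join "\n" cur], [l],
             hds ++ [PySem.Str.strip (PySem.Str.slice l (some 3) none)]) := by
          simp [pvAStep, h, hc]
        rw [hstep, ih]
        simp [pvGo, h, hc]
    · have hstep : pvAStep (secs, cur, hds) l = (secs, cur ++ [l], hds) := by
        simp [pvAStep, h]
      rw [hstep, ih]
      have hsplit : (cur ++ [l]) ++ (pvGo ls).2.2 = cur ++ l :: (pvGo ls).2.2 := by simp
      simp [pvGo, h, hsplit]

-- ===== VERDICT (by name: the statement is the Claim_ definition above) =====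
theorem parse_prompt_sections_spec : Claim_equal_parse_prompt_sections := by
  intro template _
  show _ = _
  unfold parse_prompt_sections parse_prompt_sections_alt
  have hA := pvA_fold (PySem.Str.splitlines template) [] [] []
  have hB := pvB_fold (PySem.Str.splitlines template)
  simp only [show (fun (st : List String × List String × List String) line =>
      let (sections, current, headings) := st
      if PySem.Str.startswith line "## " then
        let (sections, current) :=
          if current ≠ [] then (sections ++ [PySem.Str.join "\n" current], ([] : List String))
          else (sections, current)
        (sections, current ++ [line],
         headings ++ [PySem.Str.strip (PySem.Str.slice line (some 3) none)])
      else
        (sections, current ++ [line], headings)) = pvAStep from rfl,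
    show (fun (st : List String × List String × List String) line =>
      let (headings, sections, pending) := st
      if PySem.Str.startswith line "## " then
        (headings ++ [PySem.Str.strip (PySem.Str.slice line (some 3) none)],
         sections ++ [PySem.Str.join "\n" (line :: pending.reverse)],
         ([] : List String))
      else
        (headings, sections, pending ++ [line])) = pvBStep from rfl]
  rw [hB]
  simp only [pvFinishA] at hA
  simp only [ne_eq, ite_not, List.reverse_reverse, List.nil_append] at hA ⊢
  by_cases hp : (pvGo (PySem.Str.splitlines template)).2.2 = [] <;> simp [hp, hA]
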